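-- pv_equiv track=rewrite | github.com/jabalpureishan/LeetCode-and-GeeksForGeeks | Ticket Counter - GFG/ticket-counter.py | distributeTicket
-- ===== SOURCE A (Python) =====
-- from collections import deque
--
-- def distributeTicket(N : int, K : int) -> int:
--     array = []
--     for i in range(N):
--         array.append(i+1)
--     array = deque(array)
--     last = array[0]
--     while(len(array)>0):
--         for i in range(0,K):
--             if len(array)>0:
--                 last = array.popleft()
--             else:
--                 break
--         for i in range(K):
--             if len(array)>0:
--                 last = array.pop()
--             else:
--                 break
--     return last
-- ===== SOURCE B (Python) =====
-- def distributeTicket(N: int, K: int) -> int: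
--     # Two integer pointers advancing by K-sized chunks; O(N/K) arithmetic,
--     # no list of N elements is ever built. `last` is first assigned inside
--     # the loop, so for N <= 0 (no person) this raises, as A does.
--     lo, hi = 1, N
--     while lo <= hi:
--         take = min(K, hi - lo + 1)
--         last = lo + take - 1
--         lo += take
--         if lo <= hi:
--             take = min(K, hi - lo + 1)
--             last = hi - take + 1
--             hi -= take
--     return last
-- ===== Notes on version B (the rewrite author's own statement) =====
-- stated objective: faster
-- what changed: Replaces the O(N) deque of 1..N with its element-by-element pops by two integer pointers advanced in K-sized chunks, computing the last popped value arithmetically in O(N/K).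
import Mathlib
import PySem

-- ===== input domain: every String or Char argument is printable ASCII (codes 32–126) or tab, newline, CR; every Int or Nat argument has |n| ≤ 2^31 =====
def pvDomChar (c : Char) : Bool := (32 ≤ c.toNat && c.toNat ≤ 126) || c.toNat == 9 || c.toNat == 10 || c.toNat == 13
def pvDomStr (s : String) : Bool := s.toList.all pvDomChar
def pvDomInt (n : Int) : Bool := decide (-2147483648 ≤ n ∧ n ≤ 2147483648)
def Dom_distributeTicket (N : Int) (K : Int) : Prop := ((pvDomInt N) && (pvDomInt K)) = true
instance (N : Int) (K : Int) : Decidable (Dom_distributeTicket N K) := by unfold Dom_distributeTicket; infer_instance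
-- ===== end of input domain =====

-- B replaces A's O(N) deque of 1..N (popping K elements from each end per round)
-- by two integer pointers advanced in K-sized chunks, computing the last popped
-- value arithmetically in O(N/K); objective: faster (asymptotic).

-- ===== PORT A =====
-- 'for i in range(0,K): if len(array)>0: last = array.popleft() else: break'
-- K.toNat iterations (range(0,K) is empty for K ≤ 0), stop early on empty deque.
def popFrontN : Nat → List Int → Int → List Int × Int
  | 0, arr, last => (arr, last)
  | k + 1, arr, last =>
    match arr with
    | [] => (arr, last)                 -- break
    | a :: rest => popFrontN k rest a

-- 'for i in range(K): if len(array)>0: last = array.pop() else: break'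
def popBackN : Nat → List Int → Int → List Int × Int
  | 0, arr, last => (arr, last)
  | k + 1, arr, last =>
    match arr.getLast? with
    | none => (arr, last)               -- break
    | some a => popBackN k arr.dropLast a

-- 'while len(array) > 0: …'; fuel only makes the loop total (enough fuel is
-- available on Pre_, where each round removes at least one element).
def dtLoop : Nat → List Int → Int → Int → Int
  | 0, _, last, _ => last
  | fuel + 1, arr, last, K =>
    if arr.length > 0 then
      let p := popFrontN K.toNat arr last
      let q := popBackN K.toNat p.1 p.2
      dtLoop fuel q.1 q.2 K
    else last

def distributeTicket (N : Int) (K : Int) : Int :=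
  -- array = [i+1 for i in range(N)]
  let arr := (PySem.List.pyRange 0 N 1).map (fun i => i + 1)
  -- last = array[0]; none = IndexError (N ≤ 0), excluded by Pre_
  match PySem.List.pyGet? arr 0 with
  | none => 0
  | some last => dtLoop (arr.length + 1) arr last K

-- ===== PORT B =====
-- the while loop of Source B; fuel only makes it total (enough on Pre_)
def altLoop : Nat → Int → Int → Int → Int → Int
  | 0, _, _, last, _ => last
  | fuel + 1, lo, hi, last, K =>
    if lo ≤ hi then
      let take := min K (hi - lo + 1)
      let last1 := lo + take - 1
      let lo1 := lo + take
      if lo1 ≤ hi then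
        let take2 := min K (hi - lo1 + 1)
        altLoop fuel lo1 (hi - take2) (hi - take2 + 1) K
      else altLoop fuel lo1 hi last1 K
    else last

def distributeTicket_alt (N : Int) (K : Int) : Int :=
  -- in Source B `last` is uninitialized before the loop (UnboundLocalError for
  -- N ≤ 0, outside Pre_); 1 is a placeholder never returned when N ≥ 1.
  altLoop (N.toNat + 1) 1 N 1 K

-- ===== PRECONDITION & SPEC =====
-- A raises IndexError (array[0] on an empty deque) for N ≤ 0 and loops forever
-- for K ≤ 0 (both inner for-loops are empty), so exactly N ≥ 1 ∧ K ≥ 1 is admitted.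
def Pre_distributeTicket (N : Int) (K : Int) : Prop := 1 ≤ N ∧ 1 ≤ K
instance (N : Int) (K : Int) : Decidable (Pre_distributeTicket N K) := by
  unfold Pre_distributeTicket; infer_instance

def pvWitness_distributeTicket : Int × Int := (9, 3)

def Spec_distributeTicket (N : Int) (K : Int) (out : Int) : Prop := out = distributeTicket_alt N K
instance (N : Int) (K : Int) (out : Int) : Decidable (Spec_distributeTicket N K out) := by
  unfold Spec_distributeTicket; infer_instance

-- ===== CLAIM (what is proved, stated in full; the proofs are below) =====
def Claim_equal_distributeTicket : Prop := ∀ (N : Int) (K : Int), Dom_distributeTicket N K → Pre_distributeTicket N K → Spec_distributeTicket N K (distributeTicket N K)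

-- ===== LEMMAS AND PROOFS =====

theorem popFrontN_nil (k : Nat) (last : Int) : popFrontN k [] last = ([], last) := by
  cases k <;> simp [popFrontN]

theorem popBackN_nil (k : Nat) (last : Int) : popBackN k [] last = ([], last) := by
  cases k <;> simp [popBackN]

-- popping min k (hi+1-lo) elements from the front of [lo..hi]
theorem popFrontN_range (k : Nat) (lo hi last : Int) (hlo : lo ≤ hi) (hk : 1 ≤ k) :
    popFrontN k (PySem.List.pyRange lo (hi + 1) 1) last =
      (PySem.List.pyRange (lo + min (k : Int) (hi + 1 - lo)) (hi + 1) 1,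
       lo + min (k : Int) (hi + 1 - lo) - 1) := by
  induction k generalizing lo last with
  | zero => omega
  | succ k ih =>
    rw [PySem.List.pyRange_one_cons (by omega)]
    by_cases hk0 : k = 0
    · subst hk0
      simp [popFrontN]
      constructor
      · congr 1; omega
      · omega
    · simp only [popFrontN]
      by_cases h : lo + 1 ≤ hi
      · rw [ih (lo + 1) lo h (by omega)]
        simp only [Prod.mk.injEq]
        constructor
        · congr 1; push_cast; omega
        · push_cast; omega
      · have hlh : lo = hi := by omega
        rw [PySem.List.pyRange_one_eq_nil (by omega), popFrontN_nil]
        simp only [Prod.mk.injEq]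
        constructor
        · exact (PySem.List.pyRange_one_eq_nil (by push_cast; omega)).symm
        · push_cast; omega

-- popping min k (hi+1-lo) elements from the back of [lo..hi]
theorem popBackN_range (k : Nat) (lo hi last : Int) (hlo : lo ≤ hi) (hk : 1 ≤ k) :
    popBackN k (PySem.List.pyRange lo (hi + 1) 1) last =
      (PySem.List.pyRange lo (hi + 1 - min (k : Int) (hi + 1 - lo)) 1,
       hi - min (k : Int) (hi + 1 - lo) + 1) := by
  induction k generalizing hi last with
  | zero => omega
  | succ k ih =>
    have hsplit : PySem.List.pyRange lo (hi + 1) 1 = PySem.List.pyRange lo hi 1 ++ [hi] :=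
      PySem.List.pyRange_one_succ_right hlo
    simp only [popBackN, hsplit, List.getLast?_append, List.getLast?_singleton,
      Option.some_or, List.dropLast_concat]
    by_cases hk0 : k = 0
    · subst hk0
      simp [popBackN]
      constructor
      · congr 1; omega
      · omega
    · by_cases h : lo ≤ hi - 1
      · have : PySem.List.pyRange lo hi 1 = PySem.List.pyRange lo ((hi - 1) + 1) 1 := by
          congr 1; omega
        rw [this, ih (hi - 1) hi h (by omega)]
        simp only [Prod.mk.injEq]
        constructor
        · congr 1; push_cast; omega
        · push_cast; omega
      · have hlh : lo = hi := by omega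
        rw [PySem.List.pyRange_one_eq_nil (by omega), popBackN_nil]
        simp only [Prod.mk.injEq]
        constructor
        · exact (PySem.List.pyRange_one_eq_nil (by push_cast; omega)).symm
        · push_cast; omega

theorem dtLoop_nil (fuel : Nat) (last K : Int) : dtLoop fuel [] last K = last := by
  cases fuel <;> simp [dtLoop]

-- core simulation: the deque loop on [lo..hi] equals the pointer loop
theorem dtLoop_eq_altLoop (fuel : Nat) (lo hi last K : Int) (hK : 1 ≤ K) :
    dtLoop fuel (PySem.List.pyRange lo (hi + 1) 1) last K = altLoop fuel lo hi last K := by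
  induction fuel generalizing lo hi last with
  | zero => simp [dtLoop, altLoop]
  | succ fuel ih =>
    by_cases hlo : lo ≤ hi
    · have hlen : (PySem.List.pyRange lo (hi + 1) 1).length > 0 := by
        rw [PySem.List.length_pyRange_one]; omega
      have hKnat : (K.toNat : Int) = K := by omega
      have hk1 : 1 ≤ K.toNat := by omega
      simp only [dtLoop, if_pos hlen]
      rw [popFrontN_range K.toNat lo hi last hlo hk1, hKnat]
      set m := min K (hi + 1 - lo) with hm
      have hm1 : 1 ≤ m := by simp [hm]; omega
      simp only [altLoop, if_pos hlo]
      have htake : lo + min K (hi - lo + 1) = lo + m := by simp [hm]; congr 1; omega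
      by_cases h2 : lo + m ≤ hi
      · rw [popBackN_range K.toNat (lo + m) hi (lo + m - 1) h2 hk1, hKnat]
        rw [if_pos (by omega : lo + min K (hi - lo + 1) ≤ hi)]
        set m2 := min K (hi + 1 - (lo + m)) with hm2
        have : min K (hi - (lo + min K (hi - lo + 1)) + 1) = m2 := by
          simp [hm2, hm]; congr 1 <;> omega
        rw [htake] at *
        have hrange : PySem.List.pyRange (lo + m) (hi + 1 - m2) 1 =
            PySem.List.pyRange (lo + m) ((hi - m2) + 1) 1 := by congr 1; omega
        rw [hrange, ih]
        congr 1 <;> omega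
      · have hne : PySem.List.pyRange (lo + m) (hi + 1) 1 = [] :=
          PySem.List.pyRange_one_eq_nil (by omega)
        rw [hne, popBackN_nil, dtLoop_nil]
        rw [if_neg (by omega : ¬ lo + min K (hi - lo + 1) ≤ hi)]
        cases fuel with
        | zero => simp [altLoop, hm]; congr 1; omega
        | succ f =>
          simp only [altLoop]
          rw [if_neg (by omega : ¬ lo + min K (hi - lo + 1) ≤ hi)]
          simp [hm]; congr 1; omega
    · rw [PySem.List.pyRange_one_eq_nil (by omega), dtLoop_nil]
      simp [altLoop, hlo]

theorem arr_eq_range (N : Int) :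
    (PySem.List.pyRange 0 N 1).map (fun i => i + 1) = PySem.List.pyRange 1 (N + 1) 1 := by
  rw [PySem.List.pyRange_one, PySem.List.pyRange_one, List.map_map]
  have : (N + 1 - 1).toNat = (N - 0).toNat := by omega
  rw [this]
  apply List.map_congr_left
  intro a _
  simp; omega

-- ===== VERDICT (by name: the statement is the Claim_ definition above) =====
theorem distributeTicket_spec : Claim_equal_distributeTicket := by
  intro N K _ hPre
  obtain ⟨hN, hK⟩ := hPre
  unfold Spec_distributeTicket distributeTicket distributeTicket_alt
  simp only [arr_eq_range]
  have hcons : PySem.List.pyRange 1 (N + 1) 1 = 1 :: PySem.List.pyRange 2 (N + 1) 1 :=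
    PySem.List.pyRange_one_cons (by omega)
  rw [hcons, PySem.List.pyGet?_zero_cons, ← hcons]
  rw [PySem.List.length_pyRange_one]
  have : (N + 1 - 1).toNat = N.toNat := by omega
  rw [this]
  exact dtLoop_eq_altLoop (N.toNat + 1) 1 N 1 K hK
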